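-- pv_equiv track=rewrite | github.com/cshaizhihao/smartclash-gen | web/dev_server.py | _parse_flow_style_mapping
-- ===== SOURCE A (Python) =====
-- def _split_flow_style_fields(text):
--     fields = []
--     buf = []
--     depth = 0
--     in_single = False
--     in_double = False
--     prev = ''
--     for ch in text:
--         if ch == "'" and not in_double and prev != '\\':
--             in_single = not in_single
--         elif ch == '"' and not in_single and prev != '\\':
--             in_double = not in_double
--         elif not in_single and not in_double:
--             if ch in '{[':
--                 depth += 1
--             elif ch in '}]' and depth > 0:
--                 depth -= 1
--             elif ch == ',' and depth == 0:
--                 fields.append(''.join(buf).strip())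
--                 buf = []
--                 prev = ch
--                 continue
--         buf.append(ch)
--         prev = ch
--     if buf:
--         fields.append(''.join(buf).strip())
--     return fields
--
-- def _parse_flow_style_mapping(text):
--     text = (text or '').strip()
--     if text.startswith('{') and text.endswith('}'):
--         text = text[1:-1]
--     result = {}
--     for item in _split_flow_style_fields(text):
--         if ':' not in item:
--             continue
--         key, value = item.split(':', 1)
--         key = key.strip().strip("'\"")
--         value = value.strip().strip(',').strip()
--         value = value.strip("'\"")
--         result[key] = value
--     return result
-- ===== SOURCE B (Python) =====
-- def _find_top_comma(s, start):
--     # index of the first comma at bracket depth 0 outside quotes, scanning s[start:]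
--     depth = 0
--     sq = dq = False
--     prev = ''
--     for i in range(start, len(s)):
--         ch = s[i]
--         if ch == "'" and not dq and prev != '\\':
--             sq = not sq
--         elif ch == '"' and not sq and prev != '\\':
--             dq = not dq
--         elif not sq and not dq:
--             if ch in '{[':
--                 depth += 1
--             elif ch in '}]' and depth > 0:
--                 depth -= 1
--             elif ch == ',' and depth == 0:
--                 return i
--         prev = ch
--     return -1
--
-- def _emit(item, result):
--     item = item.strip()
--     if ':' in item:
--         key, value = item.split(':', 1)
--         result[key.strip().strip("'\"")] = \
--             value.strip().strip(',').strip().strip("'\"")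
--
-- def _parse_flow_style_mapping(text):
--     # Separator-index decomposition: repeatedly locate the next top-level comma
--     # and slice the field out of the string; no character buffer, no field list.
--     s = (text or '').strip()
--     if s.startswith('{') and s.endswith('}'):
--         s = s[1:-1]
--     result = {}
--     start = 0
--     while True:
--         i = _find_top_comma(s, start)
--         if i < 0:
--             break
--         _emit(s[start:i], result)
--         start = i + 1
--     if start < len(s):
--         _emit(s[start:], result)
--     return result
-- ===== Notes on version B (the rewrite author's own statement) =====
-- stated objective: alternative
-- what changed: A runs a buffering state machine that accumulates characters into fields, builds the complete field list, then parses it in a second loop; B never buffers characters or builds a field list: it repeatedly locates the index of the next top-level comma and slices each key:value field directly out of the string, emitting it into the dict, restarting the scanner state per segment.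
import Mathlib
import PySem

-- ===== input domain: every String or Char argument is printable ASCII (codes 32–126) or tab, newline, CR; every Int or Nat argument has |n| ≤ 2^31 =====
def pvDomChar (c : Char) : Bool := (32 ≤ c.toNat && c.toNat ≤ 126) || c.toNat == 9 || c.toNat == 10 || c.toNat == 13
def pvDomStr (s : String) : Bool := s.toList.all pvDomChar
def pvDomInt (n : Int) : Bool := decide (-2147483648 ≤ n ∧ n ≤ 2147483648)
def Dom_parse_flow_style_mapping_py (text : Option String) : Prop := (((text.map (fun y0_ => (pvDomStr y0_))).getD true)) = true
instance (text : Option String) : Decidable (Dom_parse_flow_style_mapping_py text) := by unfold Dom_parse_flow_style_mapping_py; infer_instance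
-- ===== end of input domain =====

-- B replaces A's buffering field-splitter (state machine collecting chars into a field
-- list, then a second parse loop) by repeated top-level-comma index search plus string
-- slicing straight into the dict (objective: alternative decomposition; same cost).

-- ===== PORT A =====
-- A's _split_flow_style_fields: scan chars, collecting top-level fields into a list.
def pvSplitGo (fields : List String) (buf : List Char) (depth : Int)
    (insgl indbl : Bool) (prev : Option Char) : List Char → List String
  | [] => if buf ≠ [] then fields ++ [PySem.Str.strip (String.ofList buf)] else fields
  | ch :: rest =>
    if ch == '\'' && !indbl && !(prev == some '\\') then
      pvSplitGo fields (buf ++ [ch]) depth (!insgl) indbl (some ch) rest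
    else if ch == '"' && !insgl && !(prev == some '\\') then
      pvSplitGo fields (buf ++ [ch]) depth insgl (!indbl) (some ch) rest
    else if !insgl && !indbl then
      if ch == '{' || ch == '[' then
        pvSplitGo fields (buf ++ [ch]) (depth + 1) insgl indbl (some ch) rest
      else if (ch == '}' || ch == ']') && depth > 0 then
        pvSplitGo fields (buf ++ [ch]) (depth - 1) insgl indbl (some ch) rest
      else if ch == ',' && depth == 0 then
        pvSplitGo (fields ++ [PySem.Str.strip (String.ofList buf)]) [] depth insgl indbl (some ch) rest
      else pvSplitGo fields (buf ++ [ch]) depth insgl indbl (some ch) rest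
    else pvSplitGo fields (buf ++ [ch]) depth insgl indbl (some ch) rest

-- body of A's parse loop for one (already-stripped) field
def pvItemStep (d : PySem.Dict String String) (item : String) : PySem.Dict String String :=
  if PySem.Str.isIn ":" item = false then d
  else
    match PySem.Str.splitMax? item ":" 1 with
    | some (key :: value :: _) =>
        d.insert (PySem.Str.stripChars (PySem.Str.strip key) "'\"")
          (PySem.Str.stripChars
            (PySem.Str.strip (PySem.Str.stripChars (PySem.Str.strip value) ",")) "'\"")
    | _ => d   -- unreachable: split(':',1) with ':' in item yields two pieces

def parse_flow_style_mapping_py (text : Option String) : List (String × String) :=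
  let t0 := PySem.Str.strip (text.getD "")
  let t := if PySem.Str.startswith t0 "{" && PySem.Str.endswith t0 "}" then
      PySem.Str.slice t0 (some 1) (some (-1)) else t0
  let fields := pvSplitGo [] [] 0 false false none t.toList
  (fields.foldl pvItemStep PySem.Dict.empty).items

-- ===== PORT B =====
-- B's _find_top_comma: index of first top-level comma of s from position i (none = -1).
def pvFindComma (depth : Int) (insgl indbl : Bool) (prev : Option Char) (i : Nat) :
    List Char → Option Nat
  | [] => none
  | ch :: rest =>
    if ch == '\'' && !indbl && !(prev == some '\\') then
      pvFindComma depth (!insgl) indbl (some ch) (i + 1) rest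
    else if ch == '"' && !insgl && !(prev == some '\\') then
      pvFindComma depth insgl (!indbl) (some ch) (i + 1) rest
    else if !insgl && !indbl then
      if ch == '{' || ch == '[' then
        pvFindComma (depth + 1) insgl indbl (some ch) (i + 1) rest
      else if (ch == '}' || ch == ']') && depth > 0 then
        pvFindComma (depth - 1) insgl indbl (some ch) (i + 1) rest
      else if ch == ',' && depth == 0 then some i
      else pvFindComma depth insgl indbl (some ch) (i + 1) rest
    else pvFindComma depth insgl indbl (some ch) (i + 1) rest

-- B's _emit: parse one raw field slice straight into the dict.
def pvEmit (d : PySem.Dict String String) (cs : List Char) : PySem.Dict String String :=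
  let item := PySem.Str.strip (String.ofList cs)
  if PySem.Str.isIn ":" item then
    match PySem.Str.splitMax? item ":" 1 with
    | some (key :: value :: _) =>
        d.insert (PySem.Str.stripChars (PySem.Str.strip key) "'\"")
          (PySem.Str.stripChars
            (PySem.Str.strip (PySem.Str.stripChars (PySem.Str.strip value) ",")) "'\"")
    | _ => d
  else d

-- bound on pvFindComma's result, needed for pvLoop's termination
theorem pvFindComma_bound (l : List Char) : ∀ (depth : Int) (insgl indbl : Bool)
    (prev : Option Char) (i0 i : Nat),
    pvFindComma depth insgl indbl prev i0 l = some i → i0 ≤ i ∧ i < i0 + l.length := by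
  induction l with
  | nil => intro _ _ _ _ _ _ h; simp [pvFindComma] at h
  | cons ch rest ih =>
    intro depth insgl indbl prev i0 i h
    simp only [pvFindComma] at h
    split_ifs at h
    all_goals first
      | (obtain ⟨ha, hb⟩ := ih _ _ _ _ _ _ h; simp only [List.length_cons]; omega)
      | (simp only [Option.some.injEq] at h; subst h;
         simp only [List.length_cons]; omega)

-- B's main loop: find next top-level comma, slice the field out, emit, advance.
def pvLoop (d : PySem.Dict String String) (s : List Char) (start : Nat) :
    PySem.Dict String String :=
  match h : pvFindComma 0 false false none start (s.drop start) with
  | none => if start < s.length then pvEmit d (s.drop start) else d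
  | some i =>
      pvLoop (pvEmit d ((s.drop start).take (i - start))) s (i + 1)
termination_by s.length - start
decreasing_by
  have hb := pvFindComma_bound (s.drop start) 0 false false none start i h
  have hl : (s.drop start).length = s.length - start := List.length_drop
  omega

def parse_flow_style_mapping_py_alt (text : Option String) : List (String × String) :=
  let s0 := PySem.Str.strip (text.getD "")
  let s := if PySem.Str.startswith s0 "{" && PySem.Str.endswith s0 "}" then
      PySem.Str.slice s0 (some 1) (some (-1)) else s0
  (pvLoop PySem.Dict.empty s.toList 0).items

-- ===== PRECONDITION & SPEC =====
def Spec_parse_flow_style_mapping_py (text : Option String) (out : List (String × String)) : Prop := out = parse_flow_style_mapping_py_alt text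
instance (text : Option String) (out : List (String × String)) : Decidable (Spec_parse_flow_style_mapping_py text out) := by unfold Spec_parse_flow_style_mapping_py; infer_instance

-- ===== CLAIM (what is proved, stated in full; the proofs are below) =====
def Claim_equal_parse_flow_style_mapping_py : Prop := ∀ (text : Option String), Dom_parse_flow_style_mapping_py text → Spec_parse_flow_style_mapping_py text (parse_flow_style_mapping_py text)

-- ===== LEMMAS AND PROOFS =====

-- emitting a raw slice = A's per-item step on the stripped slice
theorem pvEmit_eq (d : PySem.Dict String String) (cs : List Char) :
    pvEmit d cs = pvItemStep d (PySem.Str.strip (String.ofList cs)) := by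
  cases h : PySem.Str.isIn ":" (PySem.Str.strip (String.ofList cs)) <;>
    simp only [pvEmit, pvItemStep, h] <;> simp

-- A's splitter only appends to its field accumulator
theorem pvSplitGo_acc (chars : List Char) : ∀ (fs : List String) (buf : List Char)
    (depth : Int) (insgl indbl : Bool) (prev : Option Char),
    pvSplitGo fs buf depth insgl indbl prev chars
      = fs ++ pvSplitGo [] buf depth insgl indbl prev chars := by
  induction chars with
  | nil => intro fs buf depth insgl indbl prev; simp only [pvSplitGo]; split <;> simp
  | cons ch rest ih =>
    intro fs buf depth insgl indbl prev
    simp only [pvSplitGo]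
    split_ifs <;> try (rw [ih]; done)
    simp only [List.nil_append]
    rw [ih (fs ++ [PySem.Str.strip (String.ofList buf)]),
        ih [PySem.Str.strip (String.ofList buf)]]
    simp

-- the previous character matters only through being a backslash or not
theorem pvSplitGo_prev (chars : List Char) : ∀ (fs : List String) (buf : List Char)
    (depth : Int) (insgl indbl : Bool) (p p' : Option Char),
    (p == some '\\') = (p' == some '\\') →
    pvSplitGo fs buf depth insgl indbl p chars
      = pvSplitGo fs buf depth insgl indbl p' chars := by
  induction chars with
  | nil => intros; rfl
  | cons ch rest ih =>
    intro fs buf depth insgl indbl p p' hp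
    simp only [pvSplitGo, hp]

-- pvFindComma with start index i0 = pvFindComma from 0, shifted by i0
theorem pvFindComma_shift (l : List Char) : ∀ (depth : Int) (insgl indbl : Bool)
    (prev : Option Char) (i0 : Nat),
    pvFindComma depth insgl indbl prev i0 l
      = (pvFindComma depth insgl indbl prev 0 l).map (i0 + ·) := by
  induction l with
  | nil => intros; rfl
  | cons ch rest ih =>
    intro depth insgl indbl prev i0
    simp only [pvFindComma]
    split_ifs <;>
      first
      | (rw [ih _ _ _ _ (i0 + 1), ih _ _ _ _ 1, Option.map_map]
         congr 1; funext j; simp; omega)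
      | simp

-- the step characterisation of A's splitter in terms of B's comma search
theorem pvSplitGo_step (chars : List Char) : ∀ (buf : List Char) (depth : Int)
    (insgl indbl : Bool) (prev : Option Char),
    pvSplitGo [] buf depth insgl indbl prev chars
      = match pvFindComma depth insgl indbl prev 0 chars with
        | none => if buf ++ chars ≠ [] then
            [PySem.Str.strip (String.ofList (buf ++ chars))] else []
        | some i => PySem.Str.strip (String.ofList (buf ++ chars.take i))
            :: pvSplitGo [] [] 0 false false none (chars.drop (i + 1)) := by
  induction chars with
  | nil =>
    intro buf depth insgl indbl prev
    simp only [pvSplitGo, pvFindComma, List.append_nil, List.nil_append]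
  | cons ch rest ih =>
    intro buf depth insgl indbl prev
    by_cases h1 : (ch == '\'' && !indbl && !(prev == some '\\')) = true
    · simp only [pvSplitGo, pvFindComma, h1, if_true]
      rw [ih, pvFindComma_shift rest _ _ _ _ 1]
      cases hf : pvFindComma depth (!insgl) indbl (some ch) 0 rest with
      | none => simp
      | some j => have hj : 1 + j = j + 1 := Nat.add_comm 1 j; simp [hj]
    · rw [Bool.not_eq_true] at h1
      by_cases h2 : (ch == '"' && !insgl && !(prev == some '\\')) = true
      · simp only [pvSplitGo, pvFindComma, h1, h2, if_true, Bool.false_eq_true,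
          if_false]
        rw [ih, pvFindComma_shift rest _ _ _ _ 1]
        cases hf : pvFindComma depth insgl (!indbl) (some ch) 0 rest with
        | none => simp
        | some j => have hj : 1 + j = j + 1 := Nat.add_comm 1 j; simp [hj]
      · rw [Bool.not_eq_true] at h2
        by_cases h3 : (!insgl && !indbl) = true
        · by_cases h4 : (ch == '{' || ch == '[') = true
          · simp only [pvSplitGo, pvFindComma, h1, h2, h3, h4, if_true,
              Bool.false_eq_true, if_false]
            rw [ih, pvFindComma_shift rest _ _ _ _ 1]
            cases hf : pvFindComma (depth + 1) insgl indbl (some ch) 0 rest with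
            | none => simp
            | some j => have hj : 1 + j = j + 1 := Nat.add_comm 1 j; simp [hj]
          · rw [Bool.not_eq_true] at h4
            by_cases h5 : ((ch == '}' || ch == ']') && decide (depth > 0)) = true
            · simp only [pvSplitGo, pvFindComma, h1, h2, h3, h4, h5, if_true,
                Bool.false_eq_true, if_false]
              rw [ih, pvFindComma_shift rest _ _ _ _ 1]
              cases hf : pvFindComma (depth - 1) insgl indbl (some ch) 0 rest with
              | none => simp
              | some j => have hj : 1 + j = j + 1 := Nat.add_comm 1 j; simp [hj]
            · rw [Bool.not_eq_true] at h5
              by_cases h6 : (ch == ',' && decide (depth = 0)) = true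
              · -- top-level comma: the field closes here, the scan restarts fresh
                simp only [pvSplitGo, pvFindComma, h1, h2, h3, h4, h5, if_true,
                  Bool.false_eq_true, if_false]
                have hcm : ch = ',' ∧ depth = 0 := by
                  simpa [Bool.and_eq_true, decide_eq_true_eq] using h6
                have hq : insgl = false ∧ indbl = false := by
                  cases insgl <;> cases indbl <;> simp_all
                rw [pvSplitGo_acc, pvSplitGo_prev rest _ _ _ _ _ (some ch) none
                  (by rw [hcm.1]; decide)]
                simp [hq.1, hq.2, hcm.1, hcm.2]
              · rw [Bool.not_eq_true] at h6
                have hnc : ¬(ch = ',' ∧ depth = 0) := by simpa using h6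
                simp only [pvSplitGo, pvFindComma, h1, h2, h3, h4, h5, if_true,
                  Bool.false_eq_true, if_false]
                rw [ih, pvFindComma_shift rest _ _ _ _ 1]
                cases hf : pvFindComma depth insgl indbl (some ch) 0 rest with
                | none => simp [hnc]
                | some j =>
                  have hj : 1 + j = j + 1 := Nat.add_comm 1 j
                  simp [hj, hnc]
        · rw [Bool.not_eq_true] at h3
          simp only [pvSplitGo, pvFindComma, h1, h2, h3, Bool.false_eq_true, if_false]
          rw [ih, pvFindComma_shift rest _ _ _ _ 1]
          cases hf : pvFindComma depth insgl indbl (some ch) 0 rest with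
          | none => simp
          | some j => have hj : 1 + j = j + 1 := Nat.add_comm 1 j; simp [hj]

-- B's loop folds A's per-item step over A's field list of the remaining suffix
theorem pvLoop_eq (n : Nat) : ∀ (s : List Char) (start : Nat), s.length - start ≤ n →
    ∀ (d : PySem.Dict String String),
    pvLoop d s start
      = (pvSplitGo [] [] 0 false false none (s.drop start)).foldl pvItemStep d := by
  induction n with
  | zero =>
    intro s start hle d
    have hdrop : s.drop start = [] := List.drop_eq_nil_of_le (by omega)
    have hns : ¬ start < s.length := by omega
    rw [pvLoop]
    simp only [hdrop, pvSplitGo, hns, if_false]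
    split
    · rfl
    · next i hsome => rw [hdrop] at hsome; simp [pvFindComma] at hsome
  | succ n ih =>
    intro s start hle d
    rw [pvLoop, pvSplitGo_step]
    cases hf : pvFindComma 0 false false none start (s.drop start) with
    | none =>
      rw [pvFindComma_shift _ _ _ _ _ start] at hf
      cases hf0 : pvFindComma 0 false false none 0 (s.drop start) <;> rw [hf0] at hf <;>
        simp at hf
      simp only [List.nil_append]
      by_cases hs : start < s.length
      · have : s.drop start ≠ [] := by
          intro h; have := congrArg List.length h; simp at this; omega
        simp [hs, this, pvEmit_eq]
      · have : s.drop start = [] := List.drop_eq_nil_of_le (by omega)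
        simp [hs, this]
    | some i =>
      have hb := pvFindComma_bound _ _ _ _ _ _ _ hf
      simp only [List.length_drop] at hb
      rw [pvFindComma_shift _ _ _ _ _ start] at hf
      cases hf0 : pvFindComma 0 false false none 0 (s.drop start) with
      | none => rw [hf0] at hf; simp at hf
      | some j =>
        rw [hf0] at hf; simp at hf
        have hij : j = i - start := by omega
        subst hij
        simp only [List.nil_append]
        rw [ih s (i + 1) (by omega), pvEmit_eq]
        simp only [List.foldl_cons]
        congr 2
        rw [List.drop_drop]
        congr 1
        omega

-- B's whole loop from position 0 = fold of A's per-item step over A's field list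
theorem pvLoop_eq0 (l : List Char) (d : PySem.Dict String String) :
    pvLoop d l 0 = (pvSplitGo [] [] 0 false false none l).foldl pvItemStep d := by
  have h := pvLoop_eq l.length l 0 (by omega) d
  simpa using h

-- ===== VERDICT (by name: the statement is the Claim_ definition above) =====
theorem parse_flow_style_mapping_py_spec : Claim_equal_parse_flow_style_mapping_py := by
  intro text _
  unfold Spec_parse_flow_style_mapping_py parse_flow_style_mapping_py parse_flow_style_mapping_py_alt
  simp only [pvLoop_eq0]
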